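-- pv_equiv track=rewrite | github.com/PierpaoloLucarelli/CodingThings | isrotation/isrotation.py | isRotation
-- ===== SOURCE A (Python) =====
-- def isRotation(w1,w2):
-- 	if(len(w1) != len(w2)):
-- 		return False
-- 	first = w2[0]
-- 	for j in range(len(w2)):
-- 		if(w1[j]==first):
-- 			for i in range(len(w2)):
-- 				if(w2[i] != w1[(j+i)%len(w1)]):
-- 					return False
-- 			return True
-- 	return False
--
-- w1 = "pierpaolo"
--
-- w2 = "erpaolopi"
-- ===== SOURCE B (Python) =====
-- def isRotation(w1, w2):
--     if len(w1) != len(w2):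
--         return False
--     try:
--         j = w1.index(w2[0])
--     except ValueError:
--         return False
--     return w1[j:] + w1[:j] == w2
-- ===== Notes on version B (the rewrite author's own statement) =====
-- stated objective: simpler
-- what changed: Replaces the nested modular-index character loops by locating the single candidate offset with str.index (ValueError -> False) and comparing the one slice-rotation w1[j:]+w1[:j] against w2 directly.
import Mathlib
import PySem

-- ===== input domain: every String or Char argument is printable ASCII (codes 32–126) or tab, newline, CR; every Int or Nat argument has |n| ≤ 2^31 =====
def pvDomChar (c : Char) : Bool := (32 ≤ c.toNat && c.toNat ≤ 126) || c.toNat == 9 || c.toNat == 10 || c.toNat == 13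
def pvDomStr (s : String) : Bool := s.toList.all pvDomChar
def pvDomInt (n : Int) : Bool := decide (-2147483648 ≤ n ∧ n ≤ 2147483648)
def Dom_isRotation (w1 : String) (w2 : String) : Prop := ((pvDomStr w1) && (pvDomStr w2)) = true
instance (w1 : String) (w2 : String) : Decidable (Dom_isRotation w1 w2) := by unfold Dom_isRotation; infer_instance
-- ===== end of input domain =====

-- B replaces A's nested modular-index loops by one str.index lookup and one slice-rotation comparison (simpler).

-- ===== PORT A =====
-- inner loop: 'for i in range(len(w2)): if w2[i] != w1[(j+i)%len(w1)]: return False / return True'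
-- (all index accesses are in range under Pre_, so List.getD is exact here; the default is never read)
def pvInnerA (l1 l2 : List Char) (j : Nat) : List Nat → Bool
  | [] => true
  | i :: rest =>
    if l2.getD i 'A' ≠ l1.getD ((j + i) % l1.length) 'A' then false
    else pvInnerA l1 l2 j rest

-- outer loop: 'for j in range(len(w2)): if w1[j]==first: <inner loop>' / 'return False'
def pvOuterA (l1 l2 : List Char) (first : Char) : List Nat → Bool
  | [] => false
  | j :: rest =>
    if l1.getD j 'A' = first then pvInnerA l1 l2 j (List.range l2.length)
    else pvOuterA l1 l2 first rest

def isRotation (w1 : String) (w2 : String) : Bool :=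
  let l1 := w1.toList
  let l2 := w2.toList
  if l1.length ≠ l2.length then false
  else pvOuterA l1 l2 (l2.getD 0 'A') (List.range l2.length)

-- ===== PORT B =====
-- 'try: j = w1.index(w2[0]) except ValueError: return False' is findIdx? (none = ValueError);
-- 'w1[j:] + w1[:j] == w2' is drop/take (exact: 0 ≤ j ≤ len(w1))
def isRotation_alt (w1 : String) (w2 : String) : Bool :=
  let l1 := w1.toList
  let l2 := w2.toList
  if l1.length ≠ l2.length then false
  else
    match l1.findIdx? (· == l2.getD 0 'A') with
    | none => false
    | some j => (l1.drop j ++ l1.take j) == l2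

-- ===== PRECONDITION & SPEC =====
-- A raises IndexError at w2[0] exactly when both strings are empty (equal lengths, empty w2); B raises there too.
def Pre_isRotation (w1 : String) (w2 : String) : Prop := ¬ (w1 = "" ∧ w2 = "")
instance (w1 : String) (w2 : String) : Decidable (Pre_isRotation w1 w2) := by unfold Pre_isRotation; infer_instance
def pvWitness_isRotation : String × String := ("ab", "ba")

def Spec_isRotation (w1 : String) (w2 : String) (out : Bool) : Prop := out = isRotation_alt w1 w2
instance (w1 : String) (w2 : String) (out : Bool) : Decidable (Spec_isRotation w1 w2 out) := by unfold Spec_isRotation; infer_instance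

-- ===== CLAIM (what is proved, stated in full; the proofs are below) =====
def Claim_equal_isRotation : Prop := ∀ (w1 : String) (w2 : String), Dom_isRotation w1 w2 → Pre_isRotation w1 w2 → Spec_isRotation w1 w2 (isRotation w1 w2)

-- ===== LEMMAS AND PROOFS =====

-- the inner loop checks the rotation pointwise
lemma pvInnerA_eq (l1 l2 : List Char) (j : Nat) :
    ∀ L : List Nat, pvInnerA l1 l2 j L =
      decide (∀ i ∈ L, l2.getD i 'A' = l1.getD ((j + i) % l1.length) 'A') := by
  intro L
  induction L with
  | nil => simp [pvInnerA]
  | cons i rest ih =>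
    simp only [pvInnerA, ih]
    by_cases h : l2.getD i 'A' = l1.getD ((j + i) % l1.length) 'A' <;> simp [h]

-- the outer loop finds the first matching index and hands it to the inner loop
lemma pvOuterA_eq (l1 l2 : List Char) (first : Char) :
    ∀ L : List Nat, pvOuterA l1 l2 first L =
      match L.find? (fun j => l1.getD j 'A' == first) with
      | none => false
      | some j => pvInnerA l1 l2 j (List.range l2.length) := by
  intro L
  induction L with
  | nil => simp [pvOuterA]
  | cons j rest ih =>
    by_cases h : l1.getD j 'A' = first
    · simp only [pvOuterA]
      rw [if_pos h, List.find?_cons_of_pos (by simpa using h)]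
    · simp only [pvOuterA]
      rw [if_neg h, List.find?_cons_of_neg (by simpa using h), ih]

-- find? over range(len) of an index predicate is findIdx? on the list itself
lemma find_range' (c : Char) :
    ∀ (k a : Nat) (l1 : List Char), a + k = l1.length →
      (List.range' a k).find? (fun j => l1.getD j 'A' == c) =
        ((l1.drop a).findIdx? (· == c)).map (· + a) := by
  intro k
  induction k with
  | zero =>
    intro a l1 h
    have : l1.drop a = [] := by
      apply List.drop_eq_nil_of_le; omega
    simp [this]
  | succ k ih =>
    intro a l1 h
    have ha : a < l1.length := by omega
    have hdrop : l1.drop a = l1[a] :: l1.drop (a + 1) := List.drop_eq_getElem_cons ha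
    have hga : l1.getD a 'A' = l1[a] := List.getD_eq_getElem l1 'A' ha
    rw [List.range'_succ]
    by_cases hc : l1[a] = c
    · rw [List.find?_cons_of_pos (by simp [List.getElem?_eq_getElem ha, hc])]
      rw [hdrop, List.findIdx?_cons]
      simp [hc]
    · rw [List.find?_cons_of_neg (by simp [List.getElem?_eq_getElem ha, hc])]
      rw [hdrop, List.findIdx?_cons, ih (a + 1) l1 (by omega)]
      cases X : List.findIdx? (fun x => x == c) (l1.drop (a + 1)) <;> simp [hc, X] <;> omega

lemma find_range (c : Char) (l1 : List Char) (n : Nat) (hn : n = l1.length) :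
    (List.range n).find? (fun j => l1.getD j 'A' == c) = l1.findIdx? (· == c) := by
  rw [List.range_eq_range', hn, find_range' c l1.length 0 l1 (by omega)]
  simp

-- one element of the rotated list
lemma rot_getElem (l1 : List Char) (j i : Nat) (hj : j < l1.length) (hi : i < l1.length) :
    (l1.drop j ++ l1.take j)[i]'(by simp; omega) =
      l1[(j + i) % l1.length]'(Nat.mod_lt _ (by omega)) := by
  by_cases h : i < l1.length - j
  · rw [List.getElem_append_left (by simp; omega)]
    rw [List.getElem_drop]
    have : (j + i) % l1.length = j + i := Nat.mod_eq_of_lt (by omega)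
    simp [this]
  · rw [List.getElem_append_right (by simp; omega)]
    rw [List.getElem_take]
    have h1 : (j + i) % l1.length = j + i - l1.length := by
      have : j + i - l1.length < l1.length := by omega
      rw [Nat.mod_eq_sub_mod (by omega), Nat.mod_eq_of_lt this]
    congr 1
    simp [h1]; omega

-- pointwise rotation check ↔ slice-rotation equality
lemma rot_iff (l1 l2 : List Char) (j : Nat) (hj : j < l1.length) (hlen : l1.length = l2.length) :
    (∀ i ∈ List.range l2.length, l2.getD i 'A' = l1.getD ((j + i) % l1.length) 'A') ↔
      l1.drop j ++ l1.take j = l2 := by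
  constructor
  · intro h
    apply List.ext_getElem (by simp; omega)
    intro i h1 h2
    have hi : i < l1.length := by omega
    have hm : (j + i) % l1.length < l1.length := Nat.mod_lt _ (by omega)
    have hh := h i (List.mem_range.mpr (by omega))
    rw [List.getD_eq_getElem l2 'A' h2, List.getD_eq_getElem l1 'A' hm] at hh
    rw [rot_getElem l1 j i hj hi]
    exact hh.symm
  · intro h i hi
    simp only [List.mem_range] at hi
    subst h
    have hi' : i < l1.length := by omega
    have hl2 : i < (l1.drop j ++ l1.take j).length := by simp; omega
    have hm : (j + i) % l1.length < l1.length := Nat.mod_lt _ (by omega)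
    rw [List.getD_eq_getElem _ 'A' hl2, List.getD_eq_getElem l1 'A' hm]
    exact rot_getElem l1 j i hj hi'

-- ===== VERDICT (by name: the statement is the Claim_ definition above) =====
theorem isRotation_spec : Claim_equal_isRotation := by
  intro w1 w2 _ hpre
  unfold Spec_isRotation isRotation isRotation_alt
  simp only []
  by_cases hlen : w1.toList.length = w2.toList.length
  · rw [if_neg (by omega), if_neg (by omega)]
    rw [pvOuterA_eq, find_range _ _ _ hlen.symm]
    cases hfd : w1.toList.findIdx? (· == w2.toList.getD 0 'A') with
    | none => rfl
    | some j =>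
      have hj : j < w1.toList.length := (List.findIdx?_eq_some_iff_findIdx_eq.mp hfd).1
      show pvInnerA w1.toList w2.toList j (List.range w2.toList.length) =
        ((w1.toList.drop j ++ w1.toList.take j) == w2.toList)
      rw [pvInnerA_eq]
      by_cases hrot : w1.toList.drop j ++ w1.toList.take j = w2.toList
      · rw [decide_eq_true ((rot_iff w1.toList w2.toList j hj hlen).mpr hrot)]
        exact (beq_iff_eq.mpr hrot).symm
      · have h1 : ¬ (∀ i ∈ List.range w2.toList.length,
            w2.toList.getD i 'A' = w1.toList.getD ((j + i) % w1.toList.length) 'A') :=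
          fun hAll => hrot ((rot_iff w1.toList w2.toList j hj hlen).mp hAll)
        rw [decide_eq_false h1]
        exact (beq_eq_false_iff_ne.mpr hrot).symm
  · rw [if_pos (by omega), if_pos (by omega)]
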